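-- pv_equiv track=rewrite | github.com/Olorin-ai-git/Bayit-Plus | scripts/fix-agent-frontmatter.py | get_description_from_content
-- ===== SOURCE A (Python) =====
-- def get_description_from_content(content):
--     """Extract a description from the file content."""
--     lines = content.split('\n')
--
--     # Skip frontmatter
--     in_frontmatter = False
--     content_lines = []
--     for line in lines:
--         if line.strip() == '---':
--             if not in_frontmatter:
--                 in_frontmatter = True
--                 continue
--             else:
--                 in_frontmatter = False
--                 continue
--         if not in_frontmatter:
--             content_lines.append(line)
--
--     # Look for Role section
--     for i, line in enumerate(content_lines):
--         if line.strip().startswith('## Role'):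
--             if i + 1 < len(content_lines):
--                 desc = content_lines[i + 1].strip()
--                 if desc:
--                     return desc[:97] + '...' if len(desc) > 100 else desc
--
--     # Look for first meaningful paragraph
--     for line in content_lines:
--         line = line.strip()
--         if line and not line.startswith('#') and not line.startswith('**'):
--             return line[:97] + '...' if len(line) > 100 else line
--
--     return None
-- ===== SOURCE B (Python) =====
-- def _fmt(s):
--     return s[:97] + '...' if len(s) > 100 else s
--
--
-- def get_description_from_content(content):
--     """Extract a description from the file content (single fused scan)."""
--     lines = content.split('\n')
--
--     # Skip frontmatter (same toggle rule: every '---' line flips the state)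
--     in_frontmatter = False
--     content_lines = []
--     for line in lines:
--         if line.strip() == '---':
--             in_frontmatter = not in_frontmatter
--             continue
--         if not in_frontmatter:
--             content_lines.append(line)
--
--     # One pass: return on the first '## Role' section with a non-empty next
--     # line; meanwhile remember the first meaningful paragraph as a fallback.
--     candidate = None
--     n = len(content_lines)
--     i = 0
--     while i < n:
--         stripped = content_lines[i].strip()
--         if stripped.startswith('## Role') and i + 1 < n:
--             desc = content_lines[i + 1].strip()
--             if desc:
--                 return _fmt(desc)
--         if candidate is None and stripped and not stripped.startswith('#') \
--                 and not stripped.startswith('**'):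
--             candidate = stripped
--         i += 1
--     return _fmt(candidate) if candidate is not None else None
-- ===== Notes on version B (the rewrite author's own statement) =====
-- stated objective: alternative
-- what changed: The two separate post-frontmatter scans (a Role-section search over the whole list, then a fallback search for the first meaningful paragraph) are fused into a single pass that returns on the first Role hit and meanwhile remembers the first paragraph candidate, with the truncation factored into one helper.
import Mathlib
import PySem

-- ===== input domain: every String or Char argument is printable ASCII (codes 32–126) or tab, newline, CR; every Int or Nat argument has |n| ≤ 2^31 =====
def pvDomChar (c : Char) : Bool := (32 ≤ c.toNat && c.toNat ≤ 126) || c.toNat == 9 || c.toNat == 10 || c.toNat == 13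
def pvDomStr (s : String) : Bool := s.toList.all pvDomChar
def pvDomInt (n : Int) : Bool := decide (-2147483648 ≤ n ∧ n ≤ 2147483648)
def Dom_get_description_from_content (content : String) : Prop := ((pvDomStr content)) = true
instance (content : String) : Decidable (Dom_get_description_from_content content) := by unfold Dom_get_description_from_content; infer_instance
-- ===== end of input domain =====

-- B fuses A's two sequential scans over the content lines into one pass (alternative decomposition, same cost).

-- ===== PORT A =====
-- truncation expression 'desc[:97] + "..." if len(desc) > 100 else desc'
def pvFmtA (desc : List Char) : List Char :=
  if 100 < PySem.Chars.len desc then PySem.List.slice desc none (some 97) ++ "...".toList else desc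

-- frontmatter-stripping loop of A (state: in_frontmatter, accumulated content_lines)
def pvFMStepA (st : Bool × List (List Char)) (line : List Char) : Bool × List (List Char) :=
  if PySem.Chars.strip line = "---".toList then
    (if st.1 = false then (true, st.2) else (false, st.2))
  else if st.1 = false then (st.1, st.2 ++ [line]) else st

def pvStripFMA (lines : List (List Char)) : List (List Char) :=
  (lines.foldl pvFMStepA (false, [])).2

-- 'for i, line in enumerate(content_lines)' Role-section loop
def pvRoleA (full : List (List Char)) : List (Int × List Char) → Option (List Char)
  | [] => none
  | (i, line) :: rest =>
    if PySem.Chars.startswith (PySem.Chars.strip line) "## Role".toList then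
      if i + 1 < (full.length : Int) then
        match PySem.List.pyGet? full (i + 1) with
        | some nxt =>
          let desc := PySem.Chars.strip nxt
          if desc ≠ [] then some (pvFmtA desc) else pvRoleA full rest
        | none => pvRoleA full rest   -- unreachable: guarded by i + 1 < len
      else pvRoleA full rest
    else pvRoleA full rest

-- first-meaningful-paragraph loop
def pvParaA : List (List Char) → Option (List Char)
  | [] => none
  | line :: rest =>
    let l := PySem.Chars.strip line
    if l ≠ [] ∧ PySem.Chars.startswith l "#".toList = false ∧
        PySem.Chars.startswith l "**".toList = false then
      some (pvFmtA l)
    else pvParaA rest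

def get_description_from_content (content : String) : Option String :=
  let lines := PySem.Chars.splitOn content.toList "\n".toList
  let content_lines := pvStripFMA lines
  match pvRoleA content_lines (PySem.List.enumerate content_lines) with
  | some r => some (String.ofList r)
  | none =>
    match pvParaA content_lines with
    | some r => some (String.ofList r)
    | none => none

-- ===== PORT B =====
-- _fmt helper of Source B
def pvFmtB (s : List Char) : List Char :=
  if 100 < PySem.Chars.len s then PySem.List.slice s none (some 97) ++ "...".toList else s

-- same frontmatter toggle, written with 'not'
def pvFMStepB (st : Bool × List (List Char)) (line : List Char) : Bool × List (List Char) :=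
  if PySem.Chars.strip line = "---".toList then (!st.1, st.2)
  else if !st.1 then (st.1, st.2 ++ [line]) else st

def pvStripFMB (lines : List (List Char)) : List (List Char) :=
  (lines.foldl pvFMStepB (false, [])).2

-- 'if candidate is None and stripped and not stripped.startswith(..)..: candidate = stripped'
def pvCandB (cand : Option (List Char)) (stripped : List Char) : Option (List Char) :=
  match cand with
  | some c => some c
  | none =>
    if stripped ≠ [] ∧ PySem.Chars.startswith stripped "#".toList = false ∧
        PySem.Chars.startswith stripped "**".toList = false then
      some stripped
    else none

-- the fused while-loop of Source B (index i, stored candidate)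
def pvScanB (full : List (List Char)) (i : Nat) (cand : Option (List Char)) : Option (List Char) :=
  if h : i < full.length then
    let stripped := PySem.Chars.strip full[i]
    if PySem.Chars.startswith stripped "## Role".toList ∧ i + 1 < full.length then
      let desc := PySem.Chars.strip (full.getD (i + 1) [])
      if desc ≠ [] then some (pvFmtB desc)
      else pvScanB full (i + 1) (pvCandB cand stripped)
    else pvScanB full (i + 1) (pvCandB cand stripped)
  else
    match cand with
    | some c => some (pvFmtB c)
    | none => none
termination_by full.length - i

def get_description_from_content_alt (content : String) : Option String :=
  let lines := PySem.Chars.splitOn content.toList "\n".toList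
  let content_lines := pvStripFMB lines
  (pvScanB content_lines 0 none).map String.ofList

-- ===== PRECONDITION & SPEC =====
def Spec_get_description_from_content (content : String) (out : Option String) : Prop := out = get_description_from_content_alt content
instance (content : String) (out : Option String) : Decidable (Spec_get_description_from_content content out) := by unfold Spec_get_description_from_content; infer_instance

-- ===== CLAIM (what is proved, stated in full; the proofs are below) =====
def Claim_equal_get_description_from_content : Prop := ∀ (content : String), Dom_get_description_from_content content → Spec_get_description_from_content content (get_description_from_content content)

-- ===== LEMMAS AND PROOFS =====

theorem pvStripFM_eq (lines : List (List Char)) : pvStripFMB lines = pvStripFMA lines := by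
  have hstep : pvFMStepB = pvFMStepA := by
    funext st line
    obtain ⟨b, acc⟩ := st
    cases b <;> simp [pvFMStepA, pvFMStepB]
  unfold pvStripFMA pvStripFMB
  rw [hstep]

theorem pvHash_of_role {s : List Char}
    (h : PySem.Chars.startswith s "## Role".toList = true) :
    PySem.Chars.startswith s "#".toList = true := by
  rw [PySem.Chars.startswith_iff] at h ⊢
  exact List.IsPrefix.trans (by decide) h

theorem pvCandB_role (cand : Option (List Char)) (s : List Char)
    (h : PySem.Chars.startswith s "#".toList = true) : pvCandB cand s = cand := by
  cases cand with
  | some c => rfl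
  | none =>
    simp only [pvCandB]
    rw [if_neg (fun hc => Bool.noConfusion (h.symm.trans hc.2.1))]

theorem pvCandB_none_pos (s : List Char)
    (h : s ≠ [] ∧ PySem.Chars.startswith s "#".toList = false ∧
        PySem.Chars.startswith s "**".toList = false) :
    pvCandB none s = some s := by
  simp only [pvCandB]
  rw [if_pos h]

theorem pvCandB_none_neg (s : List Char)
    (h : ¬ (s ≠ [] ∧ PySem.Chars.startswith s "#".toList = false ∧
        PySem.Chars.startswith s "**".toList = false)) :
    pvCandB none s = none := by
  simp only [pvCandB]
  rw [if_neg h]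

theorem pvParaA_skip (line : List Char) (r : List (List Char))
    (h : PySem.Chars.startswith (PySem.Chars.strip line) "#".toList = true) :
    pvParaA (line :: r) = pvParaA r := by
  simp only [pvParaA]
  rw [if_neg (fun hc => Bool.noConfusion (h.symm.trans hc.2.1))]

theorem pvParaA_cons_pos (line : List Char) (r : List (List Char))
    (h : PySem.Chars.strip line ≠ [] ∧
        PySem.Chars.startswith (PySem.Chars.strip line) "#".toList = false ∧
        PySem.Chars.startswith (PySem.Chars.strip line) "**".toList = false) :
    pvParaA (line :: r) = some (pvFmtA (PySem.Chars.strip line)) := by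
  simp only [pvParaA]
  rw [if_pos h]

theorem pvParaA_cons_neg (line : List Char) (r : List (List Char))
    (h : ¬ (PySem.Chars.strip line ≠ [] ∧
        PySem.Chars.startswith (PySem.Chars.strip line) "#".toList = false ∧
        PySem.Chars.startswith (PySem.Chars.strip line) "**".toList = false)) :
    pvParaA (line :: r) = pvParaA r := by
  simp only [pvParaA]
  rw [if_neg h]

theorem pvRoleA_cons_not_role (full : List (List Char)) (i : Int) (line : List Char)
    (rest : List (Int × List Char))
    (h : ¬ PySem.Chars.startswith (PySem.Chars.strip line) "## Role".toList = true) :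
    pvRoleA full ((i, line) :: rest) = pvRoleA full rest := by
  simp only [pvRoleA]
  rw [if_neg h]

theorem pvRoleA_cons_far (full : List (List Char)) (i : Int) (line : List Char)
    (rest : List (Int × List Char))
    (h : ¬ (i + 1 < (full.length : Int))) :
    pvRoleA full ((i, line) :: rest) = pvRoleA full rest := by
  simp only [pvRoleA]
  by_cases hR : PySem.Chars.startswith (PySem.Chars.strip line) "## Role".toList = true
  · rw [if_pos hR, if_neg h]
  · rw [if_neg hR]

theorem pvRoleA_cons_blank (full : List (List Char)) (i : Int) (line nxt : List Char)
    (rest : List (Int × List Char))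
    (hR : PySem.Chars.startswith (PySem.Chars.strip line) "## Role".toList = true)
    (hlt : i + 1 < (full.length : Int))
    (hpy : PySem.List.pyGet? full (i + 1) = some nxt)
    (hd : PySem.Chars.strip nxt = []) :
    pvRoleA full ((i, line) :: rest) = pvRoleA full rest := by
  simp only [pvRoleA]
  rw [if_pos hR, if_pos hlt, hpy]
  simp only []
  rw [if_neg (fun hc => hc hd)]

theorem pvRoleA_cons_hit (full : List (List Char)) (i : Int) (line nxt : List Char)
    (rest : List (Int × List Char))
    (hR : PySem.Chars.startswith (PySem.Chars.strip line) "## Role".toList = true)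
    (hlt : i + 1 < (full.length : Int))
    (hpy : PySem.List.pyGet? full (i + 1) = some nxt)
    (hd : PySem.Chars.strip nxt ≠ []) :
    pvRoleA full ((i, line) :: rest) = some (pvFmtA (PySem.Chars.strip nxt)) := by
  simp only [pvRoleA]
  rw [if_pos hR, if_pos hlt, hpy]
  simp only []
  rw [if_pos hd]

theorem pvScanB_eq (full : List (List Char)) :
    ∀ (rest : List (List Char)) (k : Nat) (cand : Option (List Char)),
      full.drop k = rest →
      pvScanB full k cand =
        (match pvRoleA full (PySem.List.enumerate rest (k : Int)) with
         | some r => some r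
         | none =>
           match cand with
           | some c => some (pvFmtA c)
           | none => pvParaA rest) := by
  intro rest
  induction rest with
  | nil =>
    intro k cand hdrop
    have hk : full.length ≤ k := List.drop_eq_nil_iff.mp hdrop
    rw [pvScanB.eq_def]
    rw [dif_neg (by omega : ¬ k < full.length)]
    cases cand <;> simp [PySem.List.enumerate, pvRoleA, pvParaA, pvFmtA, pvFmtB]
  | cons line rest' ih =>
    intro k cand hdrop
    have hk : k < full.length := by
      by_contra hkk
      rw [List.drop_eq_nil_iff.mpr (by omega)] at hdrop
      exact List.cons_ne_nil _ _ hdrop.symm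
    have hdc := List.drop_eq_getElem_cons (l := full) hk
    rw [hdrop] at hdc
    injection hdc with hget hdrop'
    subst hget
    have henum : PySem.List.enumerate (full[k] :: rest') (k : Int)
        = ((k : Int), full[k]) :: PySem.List.enumerate rest' ((k + 1 : Nat) : Int) := by
      simp [PySem.List.enumerate, Nat.cast_add, Nat.cast_one]
    rw [pvScanB.eq_def, dif_pos hk, henum]
    dsimp only
    by_cases hR : PySem.Chars.startswith (PySem.Chars.strip full[k]) "## Role".toList = true
    · have hhash := pvHash_of_role hR
      have hskip := pvParaA_skip full[k] rest' hhash
      have hcand := pvCandB_role cand (PySem.Chars.strip full[k]) hhash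
      by_cases hk1 : k + 1 < full.length
      · have hpy : PySem.List.pyGet? full ((k : Int) + 1) = some full[k + 1] := by
          rw [show ((k : Int) + 1) = ((k + 1 : Nat) : Int) by push_cast; ring]
          rw [PySem.List.pyGet?_natCast, List.getElem?_eq_getElem hk1]
        have hgetD : full.getD (k + 1) [] = full[k + 1] := List.getD_eq_getElem full [] hk1
        have hc : ((k : Int) + 1 < (full.length : Int)) := by omega
        rw [if_pos ⟨hR, hk1⟩]
        rw [hgetD]
        by_cases hdesc : PySem.Chars.strip full[k + 1] = []
        · rw [if_neg (fun hc' => hc' hdesc), hcand, ih (k + 1) cand hdrop'.symm,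
              pvRoleA_cons_blank full (k : Int) full[k] full[k + 1] _ hR hc hpy hdesc,
              hskip]
        · rw [if_pos hdesc,
              pvRoleA_cons_hit full (k : Int) full[k] full[k + 1] _ hR hc hpy hdesc]
          rfl
      · have hc : ¬ ((k : Int) + 1 < (full.length : Int)) := by omega
        rw [if_neg (fun h => hk1 h.2), hcand, ih (k + 1) cand hdrop'.symm,
            pvRoleA_cons_far full (k : Int) full[k] _ hc, hskip]
    · rw [if_neg (fun h => hR h.1),
          ih (k + 1) (pvCandB cand (PySem.Chars.strip full[k])) hdrop'.symm,
          pvRoleA_cons_not_role full (k : Int) full[k] _ hR]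
      cases cand with
      | some c => rfl
      | none =>
        by_cases hP : (PySem.Chars.strip full[k] ≠ [] ∧
            PySem.Chars.startswith (PySem.Chars.strip full[k]) "#".toList = false ∧
            PySem.Chars.startswith (PySem.Chars.strip full[k]) "**".toList = false)
        · rw [pvCandB_none_pos _ hP, pvParaA_cons_pos full[k] rest' hP]
        · rw [pvCandB_none_neg _ hP, pvParaA_cons_neg full[k] rest' hP]

-- ===== VERDICT (by name: the statement is the Claim_ definition above) =====
theorem get_description_from_content_spec : Claim_equal_get_description_from_content := by
  intro content _
  unfold Spec_get_description_from_content
  simp only [get_description_from_content, get_description_from_content_alt, pvStripFM_eq]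
  rw [pvScanB_eq (pvStripFMA (PySem.Chars.splitOn content.toList "\n".toList))
      (pvStripFMA (PySem.Chars.splitOn content.toList "\n".toList)) 0 none rfl]
  simp only [Nat.cast_zero]
  cases pvRoleA (pvStripFMA (PySem.Chars.splitOn content.toList "\n".toList))
      (PySem.List.enumerate (pvStripFMA (PySem.Chars.splitOn content.toList "\n".toList)) 0) with
  | some r => rfl
  | none =>
    cases pvParaA (pvStripFMA (PySem.Chars.splitOn content.toList "\n".toList)) <;> rfl
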